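-- pv_equiv track=rewrite | github.com/Callbuddyp/callbuddy_crm | scripts/services/vad.py | map_timestamps_to_utterances
-- ===== SOURCE A (Python) =====
-- from typing import List, Optional, Tuple
--
-- def map_timestamps_to_utterances(
--     suggestion_points_ms: List[int],
--     utterances: List[dict],
--     tolerance_ms: int = 500,
-- ) -> List[int]:
--     """Map AI suggestion timestamps to utterance indices.
--
--     Finds the utterance that ends closest to each suggestion point.
--
--     Args:
--         suggestion_points_ms: List of timestamps where AI suggestions should trigger
--         utterances: List of utterance dicts with start_ms and end_ms
--         tolerance_ms: Maximum allowed difference between suggestion point and utterance end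
--
--     Returns:
--         List of utterance indices where AI suggestions should be generated
--     """
--     utterance_indices = []
--
--     for point_ms in suggestion_points_ms:
--         best_idx = None
--         best_diff = float('inf')
--
--         for idx, utt in enumerate(utterances):
--             end_ms = utt.get('end_ms', 0)
--             diff = abs(end_ms - point_ms)
--
--             if diff < best_diff and diff <= tolerance_ms:
--                 best_diff = diff
--                 best_idx = idx
--
--         if best_idx is not None and best_idx not in utterance_indices:
--             utterance_indices.append(best_idx)
--
--     return sorted(utterance_indices)
-- ===== SOURCE B (Python) =====
-- from bisect import bisect_left
-- from typing import List
--
--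
-- def map_timestamps_to_utterances(
--     suggestion_points_ms: List[int],
--     utterances: List[dict],
--     tolerance_ms: int = 500,
-- ) -> List[int]:
--     """Sort utterance ends once, then binary-search each suggestion point.
--
--     For each point only two candidates can be closest: the first entry of the
--     run of the largest end below the point, and the first entry of the run of
--     the smallest end at-or-above it; ties resolve to the lowest original index.
--     """
--     pairs = sorted((u.get('end_ms', 0), i) for i, u in enumerate(utterances))
--     ends = [e for e, _ in pairs]
--     chosen = set()
--     for p in suggestion_points_ms:
--         j = bisect_left(ends, p)
--         best = None  # (diff, original index)
--         if j < len(pairs):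
--             d = ends[j] - p
--             if d <= tolerance_ms:
--                 best = (d, pairs[j][1])
--         if j > 0:
--             e = ends[j - 1]
--             if p - e <= tolerance_ms:
--                 k = bisect_left(ends, e)  # first entry of the run with end e
--                 cand = (p - e, pairs[k][1])
--                 if best is None or cand < best:
--                     best = cand
--         if best is not None:
--             chosen.add(best[1])
--     return sorted(chosen)
-- ===== Notes on version B (the rewrite author's own statement) =====
-- stated objective: faster
-- what changed: A scans every utterance for every suggestion point; B sorts the (end_ms, index) pairs once and binary-searches each point, comparing only the run-leaders of the nearest end below and at-or-above the point (ties to the lowest original index), collecting winners in a set.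
import Mathlib
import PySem

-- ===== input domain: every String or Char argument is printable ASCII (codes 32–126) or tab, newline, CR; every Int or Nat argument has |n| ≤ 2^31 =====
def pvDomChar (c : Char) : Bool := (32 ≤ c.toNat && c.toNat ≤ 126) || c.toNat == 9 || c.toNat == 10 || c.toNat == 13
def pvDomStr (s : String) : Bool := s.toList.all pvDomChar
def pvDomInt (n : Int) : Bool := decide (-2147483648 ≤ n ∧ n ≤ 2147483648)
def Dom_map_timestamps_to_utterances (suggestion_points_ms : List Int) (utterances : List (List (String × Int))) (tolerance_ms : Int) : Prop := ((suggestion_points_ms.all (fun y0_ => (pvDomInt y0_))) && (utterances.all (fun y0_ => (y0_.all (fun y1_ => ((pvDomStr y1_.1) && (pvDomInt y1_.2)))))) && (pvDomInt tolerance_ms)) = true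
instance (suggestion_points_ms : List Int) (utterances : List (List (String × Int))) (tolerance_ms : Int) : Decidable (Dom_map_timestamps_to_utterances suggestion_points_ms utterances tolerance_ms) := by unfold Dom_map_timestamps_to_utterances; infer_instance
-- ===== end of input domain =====

-- B replaces A's per-point linear scan over all utterances by one sort of the
-- utterance ends plus a binary search per point (objective: faster; measured
-- faster in a timing run); return values are proved equal on all inputs.

-- ===== PORT A =====
-- inner loop of A: state = (best_idx, best_diff); Python's initial float('inf')
-- best_diff is modelled as `none` (compared as +infinity, exact here)
def pvAStep (point_ms tolerance_ms : Int) (st : Option Int × Option Int)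
    (pr : Int × List (String × Int)) : Option Int × Option Int :=
  let end_ms := (PySem.Dict.mk pr.2).getD "end_ms" 0
  let diff := |end_ms - point_ms|
  if (match st.2 with | none => true | some b => decide (diff < b)) && decide (diff ≤ tolerance_ms)
  then (some pr.1, some diff) else st

def map_timestamps_to_utterances (suggestion_points_ms : List Int) (utterances : List (List (String × Int))) (tolerance_ms : Int) : List Int :=
  let utterance_indices := suggestion_points_ms.foldl (fun acc point_ms =>
    let st := (PySem.List.enumerate utterances 0).foldl (pvAStep point_ms tolerance_ms) (none, none)
    match st.1 with
    | some best_idx => if best_idx ∈ acc then acc else acc ++ [best_idx]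
    | none => acc) []
  PySem.List.sorted utterance_indices (fun x => x) false

-- ===== PORT B =====
-- per-point candidate selection of B (S = pairs sorted lexicographically,
-- ends = S.map fst).  `pairs[j]` / `ends[j-1]` index at positions proved in
-- range (0 ≤ k < len), so List.getD with a dummy default is exact there.
def pvBBest (S : List (Int × Int)) (ends : List Int) (tolerance_ms p : Int) : Option (Int × Int) :=
  let j := PySem.List.bisectLeft ends p
  let best0 : Option (Int × Int) :=
    if j < S.length then
      let d := ends.getD j 0 - p
      if d ≤ tolerance_ms then some (d, (S.getD j (0, 0)).2) else none
    else none
  if 0 < j then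
    let e := ends.getD (j - 1) 0
    if p - e ≤ tolerance_ms then
      let k := PySem.List.bisectLeft ends e
      let cand : Int × Int := (p - e, (S.getD k (0, 0)).2)
      match best0 with
      | none => some cand
      | some b => if cand.1 < b.1 ∨ (cand.1 = b.1 ∧ cand.2 < b.2) then some cand else some b
    else best0
  else best0

def map_timestamps_to_utterances_alt (suggestion_points_ms : List Int) (utterances : List (List (String × Int))) (tolerance_ms : Int) : List Int :=
  let pairs := (PySem.List.enumerate utterances 0).map
    (fun pr => ((PySem.Dict.mk pr.2).getD "end_ms" 0, pr.1))
  let S := PySem.List.sorted2 pairs (fun pr => pr.1) (fun pr => pr.2) false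
  let ends := S.map (fun pr => pr.1)
  let chosen := suggestion_points_ms.foldl (fun (acc : PySem.Set Int) p =>
    match pvBBest S ends tolerance_ms p with
    | some b => PySem.Set.add acc b.2
    | none => acc) PySem.Set.empty
  PySem.List.sorted chosen (fun x => x) false

-- ===== PRECONDITION & SPEC =====
def Spec_map_timestamps_to_utterances (suggestion_points_ms : List Int) (utterances : List (List (String × Int))) (tolerance_ms : Int) (out : List Int) : Prop := out = map_timestamps_to_utterances_alt suggestion_points_ms utterances tolerance_ms
instance (suggestion_points_ms : List Int) (utterances : List (List (String × Int))) (tolerance_ms : Int) (out : List Int) : Decidable (Spec_map_timestamps_to_utterances suggestion_points_ms utterances tolerance_ms out) := by unfold Spec_map_timestamps_to_utterances; infer_instance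

-- ===== CLAIM (what is proved, stated in full; the proofs are below) =====
def Claim_equal_map_timestamps_to_utterances : Prop := ∀ (suggestion_points_ms : List Int) (utterances : List (List (String × Int))) (tolerance_ms : Int), Dom_map_timestamps_to_utterances suggestion_points_ms utterances tolerance_ms → Spec_map_timestamps_to_utterances suggestion_points_ms utterances tolerance_ms (map_timestamps_to_utterances suggestion_points_ms utterances tolerance_ms)

-- ===== LEMMAS AND PROOFS =====

-- strict / non-strict lexicographic order on (diff, index) pairs
def pvLexLt (a b : Int × Int) : Prop := a.1 < b.1 ∨ (a.1 = b.1 ∧ a.2 < b.2)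
def pvLexLe (a b : Int × Int) : Prop := a.1 < b.1 ∨ (a.1 = b.1 ∧ a.2 ≤ b.2)

-- "o is the best admissible (diff, index) candidate for point p" over pair list l
def pvIsBest (l : List (Int × Int)) (p tol : Int) (o : Option (Int × Int)) : Prop :=
  match o with
  | none => ∀ pr ∈ l, ¬(|pr.1 - p| ≤ tol)
  | some di => (∃ pr ∈ l, pr.2 = di.2 ∧ di.1 = |pr.1 - p| ∧ di.1 ≤ tol) ∧
               ∀ pr ∈ l, |pr.1 - p| ≤ tol → pvLexLe di (|pr.1 - p|, pr.2)

-- pairs-level form of A's inner step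
def pvStepP (p tol : Int) (st : Option Int × Option Int) (pr : Int × Int) : Option Int × Option Int :=
  let diff := |pr.1 - p|
  if (match st.2 with | none => true | some b => decide (diff < b)) && decide (diff ≤ tol)
  then (some pr.2, some diff) else st

def pvComb (st : Option Int × Option Int) : Option (Int × Int) :=
  match st.1, st.2 with
  | some i, some d => some (d, i)
  | _, _ => none

lemma pvIsBest_unique {l l' : List (Int × Int)} {p tol : Int} {o o' : Option (Int × Int)}
    (hperm : l.Perm l') (h : pvIsBest l p tol o) (h' : pvIsBest l' p tol o') : o = o' := by
  have hm : ∀ x, x ∈ l ↔ x ∈ l' := fun x => hperm.mem_iff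
  cases o with
  | none => cases o' with
    | none => rfl
    | some di =>
      obtain ⟨⟨pr, hpr, _, hd, htol⟩, _⟩ := h'
      exact absurd (hd ▸ htol) (h pr ((hm pr).2 hpr))
  | some di => cases o' with
    | none =>
      obtain ⟨⟨pr, hpr, _, hd, htol⟩, _⟩ := h
      exact absurd (hd ▸ htol) (h' pr ((hm pr).1 hpr))
    | some di' =>
      obtain ⟨⟨pr, hpr, hi, hd, htol⟩, hall⟩ := h
      obtain ⟨⟨pr', hpr', hi', hd', htol'⟩, hall'⟩ := h'
      have h1 := hall pr' ((hm pr').2 hpr') (hd' ▸ htol')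
      have h2 := hall' pr ((hm pr).1 hpr) (hd ▸ htol)
      rw [← hd'] at h1; rw [hi'] at h1
      rw [← hd] at h2; rw [hi] at h2
      simp only [pvLexLe] at h1 h2
      have : di.1 = di'.1 ∧ di.2 = di'.2 := by omega
      simp [Prod.ext_iff, this.1, this.2]

lemma pvShape (p tol : Int) (l : List (Int × Int)) :
    l.foldl (pvStepP p tol) (none, none) = (none, none) ∨
    ∃ i d, l.foldl (pvStepP p tol) (none, none) = (some i, some d) := by
  induction l using List.reverseRecOn with
  | nil => exact Or.inl rfl
  | append_singleton t y iht =>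
    rw [List.foldl_append, List.foldl_cons, List.foldl_nil]
    rcases iht with hh | ⟨i, d, hh⟩ <;> rw [hh] <;> simp only [pvStepP] <;> split
    · exact Or.inr ⟨_, _, rfl⟩
    · exact Or.inl rfl
    · exact Or.inr ⟨_, _, rfl⟩
    · exact Or.inr ⟨i, d, rfl⟩

lemma pvA_fold (p tol : Int) (l : List (Int × Int)) (hpw : l.Pairwise (fun a b => a.2 < b.2)) :
    pvIsBest l p tol (pvComb (l.foldl (pvStepP p tol) (none, none))) := by
  induction l using List.reverseRecOn with
  | nil => intro pr hpr; simp at hpr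
  | append_singleton l x ih =>
    rw [List.pairwise_append] at hpw
    obtain ⟨hl, -, hx⟩ := hpw
    have hx' : ∀ a ∈ l, a.2 < x.2 := fun a ha => hx a ha x (List.mem_singleton_self x)
    have hb := ih hl
    rw [List.foldl_append, List.foldl_cons, List.foldl_nil]
    rcases pvShape p tol l with hh | ⟨i, d, hh⟩ <;> rw [hh] at hb ⊢
    · -- so far: nothing admissible in l
      simp only [pvComb, pvIsBest] at hb
      simp only [pvStepP]
      split
      · rename_i hcond
        simp only [Bool.and_eq_true, decide_eq_true_eq] at hcond
        refine ⟨⟨x, by simp, rfl, rfl, hcond.2⟩, ?_⟩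
        intro pr hpr htolpr
        rcases List.mem_append.1 hpr with hin | hxx
        · exact absurd htolpr (hb pr hin)
        · simp at hxx; subst hxx; right; exact ⟨rfl, le_refl _⟩
      · rename_i hcond
        simp only [Bool.and_eq_true, decide_eq_true_eq] at hcond
        intro pr hpr
        rcases List.mem_append.1 hpr with hin | hxx
        · exact hb pr hin
        · simp at hxx; subst hxx
          exact fun htl => hcond ⟨trivial, htl⟩
    · -- so far: best (d, i)
      simp only [pvComb, pvIsBest] at hb
      obtain ⟨⟨pr0, hpr0, hpr0i, hpr0d, hpr0tol⟩, hball⟩ := hb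
      simp only [pvStepP]
      split
      · rename_i hcond
        simp only [Bool.and_eq_true, decide_eq_true_eq] at hcond
        refine ⟨⟨x, by simp, rfl, rfl, hcond.2⟩, ?_⟩
        intro pr hpr htolpr
        rcases List.mem_append.1 hpr with hin | hxx
        · have := hball pr hin htolpr
          simp only [pvLexLe] at this ⊢
          have hdx : |x.1 - p| < d := hcond.1
          omega
        · simp at hxx; subst hxx; right; exact ⟨rfl, le_refl _⟩
      · rename_i hcond
        simp only [Bool.and_eq_true, decide_eq_true_eq] at hcond
        refine ⟨⟨pr0, List.mem_append.2 (Or.inl hpr0), hpr0i, hpr0d, hpr0tol⟩, ?_⟩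
        intro pr hpr htolpr
        rcases List.mem_append.1 hpr with hin | hxx
        · exact hball pr hin htolpr
        · simp at hxx; subst hxx
          have hnd : ¬(|pr.1 - p| < d) := fun hlt => hcond ⟨hlt, htolpr⟩
          simp only [pvLexLe]
          rcases lt_or_eq_of_le (not_lt.1 hnd) with hlt | heq
          · left; exact hlt
          · right; exact ⟨heq, le_of_lt (hpr0i ▸ hx' pr0 hpr0)⟩

-- the combined comparison used by sorted2 with fst/snd keys is exactly strict lex
lemma pvBefore_eq (a b : Int × Int) :
    ((decide (a.1 < b.1) || (!decide (b.1 < a.1) && decide (a.2 < b.2))) = true) ↔ pvLexLt a b := by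
  simp only [pvLexLt, Bool.or_eq_true, Bool.and_eq_true, Bool.not_eq_true', decide_eq_true_eq,
    decide_eq_false_iff_not]
  omega

lemma pvInsertBy_pairwise (bf : Int × Int → Int × Int → Bool)
    (hbf : ∀ a b, bf a b = true ↔ pvLexLt a b)
    (x : Int × Int) (acc : List (Int × Int)) (hacc : acc.Pairwise pvLexLt)
    (hx : ∀ y ∈ acc, y.2 < x.2) :
    (PySem.List.insertBy bf x acc).Pairwise pvLexLt := by
  induction acc with
  | nil => simp [PySem.List.insertBy]
  | cons y ys ih =>
    rw [List.pairwise_cons] at hacc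
    obtain ⟨hy, hys⟩ := hacc
    simp only [PySem.List.insertBy]
    split
    · rename_i hxy
      rw [hbf] at hxy
      refine List.Pairwise.cons ?_ (List.Pairwise.cons hy hys)
      intro z hz
      rcases List.mem_cons.1 hz with rfl | hz'
      · exact hxy
      · have := hy z hz'
        simp only [pvLexLt] at *
        omega
    · rename_i hxy
      rw [hbf] at hxy
      have hyx : pvLexLt y x := by
        have := hx y (List.mem_cons_self)
        simp only [pvLexLt] at hxy ⊢
        omega
      refine List.Pairwise.cons ?_ (ih hys (fun z hz => hx z (List.mem_cons_of_mem y hz)))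
      intro z hz
      rcases (PySem.List.mem_insertBy bf x z ys).1 hz with rfl | hz'
      · exact hyx
      · exact hy z hz'

lemma pvFoldl_insertBy (bf : Int × Int → Int × Int → Bool)
    (hbf : ∀ a b, bf a b = true ↔ pvLexLt a b)
    (l : List (Int × Int)) (h : l.Pairwise (fun a b => a.2 < b.2)) :
    (l.foldl (fun acc x => PySem.List.insertBy bf x acc) []).Pairwise pvLexLt ∧
    ∀ y ∈ l.foldl (fun acc x => PySem.List.insertBy bf x acc) [], y ∈ l := by
  induction l using List.reverseRecOn with
  | nil => simp
  | append_singleton t x ih =>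
    rw [List.pairwise_append] at h
    obtain ⟨ht, -, hx⟩ := h
    obtain ⟨ihp, ihm⟩ := ih ht
    rw [List.foldl_append, List.foldl_cons, List.foldl_nil]
    constructor
    · exact pvInsertBy_pairwise bf hbf x _ ihp
        (fun y hy => hx y (ihm y hy) x (List.mem_singleton_self x))
    · intro y hy
      rcases (PySem.List.mem_insertBy bf x y _).1 hy with rfl | hy'
      · exact List.mem_append.2 (Or.inr (List.mem_singleton_self y))
      · exact List.mem_append.2 (Or.inl (ihm y hy'))

lemma pvSorted2_pairwise (l : List (Int × Int)) (h : l.Pairwise (fun a b => a.2 < b.2)) :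
    (PySem.List.sorted2 l (fun pr => pr.1) (fun pr => pr.2) false).Pairwise pvLexLt := by
  have := (pvFoldl_insertBy _ (fun a b => pvBefore_eq a b) l h).1
  simpa only [PySem.List.sorted2] using this

lemma pvB_best (S : List (Int × Int)) (hpw : S.Pairwise pvLexLt) (p tol : Int) :
    pvIsBest S p tol (pvBBest S (S.map (fun pr => pr.1)) tol p) := by
  set ends := S.map (fun pr : Int × Int => pr.1) with hends
  have hlen : ends.length = S.length := by simp [hends]
  have hend : ∀ m (hm : m < S.length), ends[m]'(by omega) = (S[m]'hm).1 := by
    intro m hm; simp [hends]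
  have hpe : ends.Pairwise (· ≤ ·) := by
    rw [hends, List.pairwise_map]
    exact hpw.imp (fun h => by simp only [pvLexLt] at h; omega)
  have hmono : ∀ m m' (hm : m ≤ m') (hm' : m' < S.length), (S[m]'(by omega)).1 ≤ (S[m']'hm').1 := by
    intro m m' hm hm'
    rcases Nat.eq_or_lt_of_le hm with rfl | hlt
    · exact le_refl _
    · have := (List.pairwise_iff_getElem.1 hpw) m m' (by omega) hm' hlt
      simp only [pvLexLt] at this; omega
  have hlex : ∀ m m' (hm : m < m') (hm' : m' < S.length),
      pvLexLt (S[m]'(by omega)) (S[m']'hm') :=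
    fun m m' hm hm' => (List.pairwise_iff_getElem.1 hpw) m m' (by omega) hm' hm
  set j := PySem.List.bisectLeft ends p with hj
  obtain ⟨hj_le, hj_lt, hj_ge⟩ := PySem.List.bisectLeft_spec ends p hpe
  rw [hlen] at hj_le
  -- membership at positions
  have hmem : ∀ pr, pr ∈ S → ∃ m, ∃ hm : m < S.length, S[m]'hm = pr := by
    intro pr h; exact List.mem_iff_getElem.1 h
  -- position-side classification
  have hbelow : ∀ m (hm : m < S.length), m < j → (S[m]'hm).1 < p := by
    intro m hm hmj; have := hj_lt m (by omega) hmj; rwa [hend m hm] at this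
  have habove : ∀ m (hm : m < S.length), j ≤ m → p ≤ (S[m]'hm).1 := by
    intro m hm hmj; have := hj_ge m (by omega) hmj; rwa [hend m hm] at this
  have habs1 : ∀ e : Int, p ≤ e → |e - p| = e - p := fun _ h => abs_of_nonneg (by omega)
  have habs2 : ∀ e : Int, e < p → |e - p| = p - e := by
    intro e h; rw [abs_sub_comm]; exact abs_of_nonneg (by omega)
  -- UPPER side (j < S.length): first entry at or above p
  have hup : ∀ (hjn : j < S.length),
      S.getD j (0,0) ∈ S ∧ ends.getD j 0 = (S.getD j (0,0)).1 ∧ p ≤ ends.getD j 0 ∧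
      ∀ pr ∈ S, p ≤ pr.1 →
        pvLexLe (ends.getD j 0 - p, (S.getD j (0,0)).2) (pr.1 - p, pr.2) := by
    intro hjn
    have hS : S.getD j (0,0) = S[j]'hjn := List.getD_eq_getElem S (0,0) hjn
    have hE : ends.getD j 0 = ends[j]'(by omega) := List.getD_eq_getElem ends 0 (by omega)
    rw [hS, hE, hend j hjn]
    refine ⟨List.getElem_mem hjn, rfl, habove j hjn (le_refl j), ?_⟩
    intro pr hpr hge
    obtain ⟨m, hm, heq⟩ := hmem pr hpr
    have hmj : j ≤ m := by
      by_contra hc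
      exact absurd hge (by have := hbelow m hm (by omega); rw [heq] at this; omega)
    rcases Nat.eq_or_lt_of_le hmj with rfl | hlt
    · rw [heq]; right; exact ⟨rfl, le_refl _⟩
    · have := hlex j m hlt hm
      rw [heq] at this
      simp only [pvLexLt, pvLexLe] at this ⊢
      omega
  -- LOWER side (0 < j): first entry of the run of the largest end below p
  have hlow : ∀ (hj0 : 0 < j),
      (S.getD (PySem.List.bisectLeft ends (ends.getD (j-1) 0)) (0,0)) ∈ S ∧
      (S.getD (PySem.List.bisectLeft ends (ends.getD (j-1) 0)) (0,0)).1 = ends.getD (j-1) 0 ∧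
      ends.getD (j-1) 0 < p ∧
      ∀ pr ∈ S, pr.1 < p →
        pvLexLe (p - ends.getD (j-1) 0, (S.getD (PySem.List.bisectLeft ends (ends.getD (j-1) 0)) (0,0)).2)
                (p - pr.1, pr.2) := by
    intro hj0
    have hj1 : j - 1 < S.length := by omega
    have hejd : ends.getD (j-1) 0 = ends[j-1]'(by omega) := List.getD_eq_getElem ends 0 (by omega)
    rw [hejd, hend (j-1) hj1]
    generalize hgen : (S[j-1]'hj1).1 = e at *
    obtain ⟨hk_le, hk_lt, hk_ge⟩ := PySem.List.bisectLeft_spec ends e hpe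
    have hkj : PySem.List.bisectLeft ends e ≤ j - 1 := by
      by_contra hc
      have := hk_lt (j-1) (by omega) (by omega)
      rw [hend (j-1) hj1, hgen] at this; omega
    have hkl : PySem.List.bisectLeft ends e < S.length := by omega
    have hSd : S.getD (PySem.List.bisectLeft ends e) (0,0) = S[PySem.List.bisectLeft ends e]'hkl :=
      List.getD_eq_getElem S (0,0) hkl
    rw [hSd]
    have hSk : (S[PySem.List.bisectLeft ends e]'hkl).1 = e := by
      have h1 : e ≤ ends[PySem.List.bisectLeft ends e]'(by omega) := hk_ge _ (by omega) (le_refl _)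
      rw [hend _ hkl] at h1
      have h2 : (S[PySem.List.bisectLeft ends e]'hkl).1 ≤ e := by
        have := hmono (PySem.List.bisectLeft ends e) (j-1) (by omega) hj1
        rwa [hgen] at this
      omega
    have hep : e < p := by have := hbelow (j-1) hj1 (by omega); rwa [hgen] at this
    refine ⟨List.getElem_mem hkl, hSk, hep, ?_⟩
    intro pr hpr hlt
    obtain ⟨m, hm, heq⟩ := hmem pr hpr
    have hmj : m < j := by
      by_contra hc
      have := habove m hm (by omega); rw [heq] at this; omega
    have hpre : pr.1 ≤ e := by
      have := hmono m (j-1) (by omega) hj1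
      rw [heq, hgen] at this; omega
    rcases lt_or_eq_of_le hpre with hlt2 | heqe
    · left; simp only; omega
    · have hmk : PySem.List.bisectLeft ends e ≤ m := by
        by_contra hc
        have := hk_lt m (by omega) (by omega)
        rw [hend m hm, heq] at this; omega
      rcases Nat.eq_or_lt_of_le hmk with heq2 | hkm
      · right
        constructor
        · simp only; omega
        · have : S[PySem.List.bisectLeft ends e]'hkl = pr := by rw [← heq]; congr 1
          rw [this]
      · have := hlex _ m hkm hm
        rw [heq] at this
        simp only [pvLexLt, pvLexLe] at this ⊢
        omega
  have hnone_up : ¬(j < S.length) → ∀ pr ∈ S, pr.1 < p := by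
    intro hc pr hpr
    obtain ⟨m, hm, heq⟩ := hmem pr hpr
    have := hbelow m hm (by omega); rwa [heq] at this
  have hnone_lo : ¬(0 < j) → ∀ pr ∈ S, p ≤ pr.1 := by
    intro hc pr hpr
    obtain ⟨m, hm, heq⟩ := hmem pr hpr
    have := habove m hm (by omega); rwa [heq] at this
  simp only [pvBBest]
  rw [← hj]
  by_cases hj0 : 0 < j
  · obtain ⟨hLmem, hLfst, hLp, hLall⟩ := hlow hj0
    rw [if_pos hj0]
    by_cases htl : p - ends.getD (j-1) 0 ≤ tol
    · rw [if_pos htl]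
      by_cases hjn : j < S.length
      · obtain ⟨hUmem, hUfst, hUp, hUall⟩ := hup hjn
        rw [if_pos hjn]
        by_cases htu : ends.getD j 0 - p ≤ tol
        · rw [if_pos htu]
          -- two candidates; the match picks the lex-smaller
          split
          · rename_i heqn
            exact absurd heqn (by simp)
          · rename_i di heqb
            injection heqb with heqb
            subst heqb
            split
            · rename_i hltc
              refine ⟨⟨S.getD (PySem.List.bisectLeft ends (ends.getD (j-1) 0)) (0,0), hLmem, rfl, ?_, htl⟩, ?_⟩
              · rw [hLfst, habs2 _ hLp]
              · intro pr hpr htolpr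
                by_cases hside : p ≤ pr.1
                · have h1 := hUall pr hpr hside
                  rw [habs1 _ hside]
                  simp only [pvLexLe] at h1 ⊢
                  simp only at hltc
                  omega
                · have h2 := hLall pr hpr (by omega)
                  rw [habs2 _ (by omega)]
                  exact h2
            · rename_i hltc
              simp only [not_or, not_and, not_lt] at hltc
              refine ⟨⟨S.getD j (0,0), hUmem, rfl, ?_, htu⟩, ?_⟩
              · rw [hUfst] at hUp ⊢; rw [habs1 _ hUp]
              · intro pr hpr htolpr
                by_cases hside : p ≤ pr.1
                · have h1 := hUall pr hpr hside
                  rw [habs1 _ hside]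
                  exact h1
                · have h2 := hLall pr hpr (by omega)
                  rw [habs2 _ (by omega)]
                  simp only [pvLexLe] at h2 ⊢
                  omega
        · rw [if_neg htu]
          simp only
          refine ⟨⟨S.getD (PySem.List.bisectLeft ends (ends.getD (j-1) 0)) (0,0), hLmem, rfl, ?_, htl⟩, ?_⟩
          · rw [hLfst, habs2 _ hLp]
          · intro pr hpr htolpr
            by_cases hside : p ≤ pr.1
            · exfalso
              have h1 := hUall pr hpr hside
              rw [habs1 _ hside] at htolpr
              simp only [pvLexLe] at h1
              omega
            · have h2 := hLall pr hpr (by omega)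
              rw [habs2 _ (by omega)]
              exact h2
      · rw [if_neg hjn]
        simp only
        refine ⟨⟨S.getD (PySem.List.bisectLeft ends (ends.getD (j-1) 0)) (0,0), hLmem, rfl, ?_, htl⟩, ?_⟩
        · rw [hLfst, habs2 _ hLp]
        · intro pr hpr htolpr
          have hside := hnone_up hjn pr hpr
          rw [habs2 _ hside]
          exact hLall pr hpr hside
    · rw [if_neg htl]
      by_cases hjn : j < S.length
      · obtain ⟨hUmem, hUfst, hUp, hUall⟩ := hup hjn
        rw [if_pos hjn]
        by_cases htu : ends.getD j 0 - p ≤ tol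
        · rw [if_pos htu]
          refine ⟨⟨S.getD j (0,0), hUmem, rfl, ?_, htu⟩, ?_⟩
          · rw [hUfst] at hUp ⊢; rw [habs1 _ hUp]
          · intro pr hpr htolpr
            by_cases hside : p ≤ pr.1
            · have h1 := hUall pr hpr hside
              rw [habs1 _ hside]
              exact h1
            · exfalso
              have h2 := hLall pr hpr (by omega)
              rw [habs2 _ (by omega)] at htolpr
              simp only [pvLexLe] at h2
              omega
        · rw [if_neg htu]
          intro pr hpr htolpr
          by_cases hside : p ≤ pr.1
          · have h1 := hUall pr hpr hside
            rw [habs1 _ hside] at htolpr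
            simp only [pvLexLe] at h1
            omega
          · have h2 := hLall pr hpr (by omega)
            rw [habs2 _ (by omega)] at htolpr
            simp only [pvLexLe] at h2
            omega
      · rw [if_neg hjn]
        intro pr hpr htolpr
        have hside := hnone_up hjn pr hpr
        have h2 := hLall pr hpr hside
        rw [habs2 _ hside] at htolpr
        simp only [pvLexLe] at h2
        omega
  · rw [if_neg hj0]
    by_cases hjn : j < S.length
    · obtain ⟨hUmem, hUfst, hUp, hUall⟩ := hup hjn
      rw [if_pos hjn]
      by_cases htu : ends.getD j 0 - p ≤ tol
      · rw [if_pos htu]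
        refine ⟨⟨S.getD j (0,0), hUmem, rfl, ?_, htu⟩, ?_⟩
        · rw [hUfst] at hUp ⊢; rw [habs1 _ hUp]
        · intro pr hpr htolpr
          have hside := hnone_lo hj0 pr hpr
          rw [habs1 _ hside]
          exact hUall pr hpr hside
      · rw [if_neg htu]
        intro pr hpr htolpr
        have hside := hnone_lo hj0 pr hpr
        have h1 := hUall pr hpr hside
        rw [habs1 _ hside] at htolpr
        simp only [pvLexLe] at h1
        omega
    · rw [if_neg hjn]
      intro pr hpr htolpr
      exact absurd (hnone_up hjn pr hpr) (by have := hnone_lo hj0 pr hpr; omega)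

-- the pair list both sides work from
def pvPairs (utterances : List (List (String × Int))) : List (Int × Int) :=
  (PySem.List.enumerate utterances 0).map
    (fun pr => ((PySem.Dict.mk pr.2).getD "end_ms" 0, pr.1))

lemma pvPairs_pairwise (utterances : List (List (String × Int))) :
    (pvPairs utterances).Pairwise (fun a b => a.2 < b.2) := by
  rw [pvPairs, List.pairwise_map]
  exact PySem.List.pairwise_lt_enumerate utterances 0

lemma pvA_inner_eq (utterances : List (List (String × Int))) (p tol : Int) :
    (PySem.List.enumerate utterances 0).foldl (pvAStep p tol) (none, none) =
    (pvPairs utterances).foldl (pvStepP p tol) (none, none) := by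
  rw [pvPairs, List.foldl_map]
  rfl

-- per point, A's scan and B's bisection select the same candidate
lemma pvSelect_eq (utterances : List (List (String × Int))) (p tol : Int) :
    pvComb ((PySem.List.enumerate utterances 0).foldl (pvAStep p tol) (none, none)) =
      pvBBest (PySem.List.sorted2 (pvPairs utterances) (fun pr => pr.1) (fun pr => pr.2) false)
        ((PySem.List.sorted2 (pvPairs utterances) (fun pr => pr.1) (fun pr => pr.2) false).map
          (fun pr => pr.1)) tol p := by
  have hpwP := pvPairs_pairwise utterances
  have hperm : (PySem.List.sorted2 (pvPairs utterances) (fun pr => pr.1) (fun pr => pr.2) false).Perm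
      (pvPairs utterances) := PySem.List.sorted2_perm _ _ _ _
  have hpwS := pvSorted2_pairwise (pvPairs utterances) hpwP
  rw [pvA_inner_eq]
  exact pvIsBest_unique hperm.symm (pvA_fold p tol _ hpwP) (pvB_best _ hpwS p tol)

-- per point, the two accumulator updates agree
lemma pvUpdate_eq (utterances : List (List (String × Int))) (tol p : Int) (acc : List Int) :
    (match ((PySem.List.enumerate utterances 0).foldl (pvAStep p tol) (none, none)).1 with
     | some best_idx => if best_idx ∈ acc then acc else acc ++ [best_idx]
     | none => acc) =
    (match pvBBest (PySem.List.sorted2 (pvPairs utterances) (fun pr => pr.1) (fun pr => pr.2) false)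
        ((PySem.List.sorted2 (pvPairs utterances) (fun pr => pr.1) (fun pr => pr.2) false).map
          (fun pr => pr.1)) tol p with
     | some b => PySem.Set.add acc b.2
     | none => acc) := by
  rw [← pvSelect_eq]
  rw [pvA_inner_eq]
  rcases pvShape p tol (pvPairs utterances) with hh | ⟨i, d, hh⟩ <;> rw [hh]
  · rfl
  · simp only [pvComb]
    by_cases hmem : i ∈ acc <;>
      simp [PySem.Set.add, PySem.Set.contains, hmem]

-- ===== VERDICT (by name: the statement is the Claim_ definition above) =====
theorem map_timestamps_to_utterances_spec : Claim_equal_map_timestamps_to_utterances := by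
  intro points utts tol _hdom
  unfold Spec_map_timestamps_to_utterances
  simp only [map_timestamps_to_utterances, map_timestamps_to_utterances_alt]
  refine congrArg (fun l => PySem.List.sorted l (fun x => x) false) ?_
  exact PySem.List.foldl_congr_mem points _ _ _ (fun acc p _ => pvUpdate_eq utts tol p acc)
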